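-- pv_equiv track=rewrite | github.com/Skorch/adventofcode2022 | 08/part2.py | line_of_sight_trees
-- ===== SOURCE A (Python) =====
-- def line_of_sight_trees(trees, current_height):
--     line_of_sight = []
--
--     for ix, tree in enumerate(trees):
--         if tree < current_height:
--             line_of_sight.append(tree)
--         else:
--             line_of_sight.append(tree)
--             break
--     return line_of_sight
-- ===== SOURCE B (Python) =====
-- def line_of_sight_trees(trees, current_height):
--     # Right-to-left pass: walk the trees from the far end, keeping the visible
--     # suffix seen so far in reverse; a blocking tree (>= current_height) resets
--     # the window to just itself, a shorter tree extends it. No early exit: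
--     # the answer is whatever window survives the whole backwards sweep.
--     window_rev = []
--     for t in reversed(trees):
--         if t >= current_height:
--             window_rev = [t]
--         else:
--             window_rev.append(t)
--     return window_rev[::-1]
-- ===== Notes on version B (the rewrite author's own statement) =====
-- stated objective: alternative
-- what changed: B sweeps the list backwards with a reset-on-blocker window (a right fold: each blocking tree resets the accumulated visible window to itself, shorter trees extend it) and reverses at the end, instead of A's forward enumerate loop that appends and breaks at the first blocker.
import Mathlib
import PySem

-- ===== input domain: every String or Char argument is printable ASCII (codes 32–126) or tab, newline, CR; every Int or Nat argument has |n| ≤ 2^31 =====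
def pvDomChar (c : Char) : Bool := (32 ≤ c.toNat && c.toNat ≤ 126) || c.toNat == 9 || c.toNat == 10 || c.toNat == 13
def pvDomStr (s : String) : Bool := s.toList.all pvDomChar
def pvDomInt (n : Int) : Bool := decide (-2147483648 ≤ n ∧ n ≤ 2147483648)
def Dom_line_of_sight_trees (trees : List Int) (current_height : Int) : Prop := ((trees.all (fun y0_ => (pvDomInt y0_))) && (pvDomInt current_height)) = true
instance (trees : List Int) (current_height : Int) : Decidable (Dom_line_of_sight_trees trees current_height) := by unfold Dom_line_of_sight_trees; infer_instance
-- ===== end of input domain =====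

-- B replaces A's forward append-and-break loop by a backwards sweep with a reset-on-blocker window; same return value.

-- ===== PORT A =====
-- Literal port of A's loop: append each tree to the accumulator; on the first tree ≥ current_height append it and stop.
def lineOfSightA (current_height : Int) (acc : List Int) : List Int → List Int
  | [] => acc
  | t :: ts =>
    if t < current_height then lineOfSightA current_height (acc ++ [t]) ts
    else acc ++ [t]

def line_of_sight_trees (trees : List Int) (current_height : Int) : List Int :=
  lineOfSightA current_height [] trees

-- ===== PORT B =====
-- Literal port of B: fold over reversed(trees), resetting the reversed window at each
-- blocking tree and appending otherwise; reverse the surviving window at the end.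
def line_of_sight_trees_alt (trees : List Int) (current_height : Int) : List Int :=
  (trees.reverse.foldl
      (fun window_rev t => if current_height ≤ t then [t] else window_rev ++ [t]) []).reverse

-- ===== PRECONDITION & SPEC =====
def Spec_line_of_sight_trees (trees : List Int) (current_height : Int) (out : List Int) : Prop := out = line_of_sight_trees_alt trees current_height
instance (trees : List Int) (current_height : Int) (out : List Int) : Decidable (Spec_line_of_sight_trees trees current_height out) := by unfold Spec_line_of_sight_trees; infer_instance

-- ===== CLAIM =====
def Claim_equal_line_of_sight_trees : Prop := ∀ (trees : List Int) (current_height : Int), Dom_line_of_sight_trees trees current_height → Spec_line_of_sight_trees trees current_height (line_of_sight_trees trees current_height)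

-- ===== LEMMAS AND PROOFS =====
-- Proof-only normal form: the visible prefix as a structural recursion.
def losRec (current_height : Int) : List Int → List Int
  | [] => []
  | t :: ts => if current_height ≤ t then [t] else t :: losRec current_height ts

theorem lineOfSightA_eq_losRec (current_height : Int) (trees : List Int) :
    ∀ acc : List Int, lineOfSightA current_height acc trees = acc ++ losRec current_height trees := by
  induction trees with
  | nil => intro acc; simp [lineOfSightA, losRec]
  | cons t ts ih =>
    intro acc
    by_cases h : t < current_height
    · rw [lineOfSightA]
      simp only [if_pos h]
      rw [ih (acc ++ [t]), losRec, if_neg (by omega)]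
      simp
    · rw [lineOfSightA]
      simp only [if_neg h]
      rw [losRec, if_pos (by omega)]

theorem foldl_rev_eq_losRec (current_height : Int) (trees : List Int) :
    trees.reverse.foldl
        (fun window_rev t => if current_height ≤ t then [t] else window_rev ++ [t]) []
      = (losRec current_height trees).reverse := by
  induction trees with
  | nil => simp [losRec]
  | cons t ts ih =>
    rw [List.reverse_cons, List.foldl_append, ih, losRec]
    by_cases h : current_height ≤ t
    · simp [h]
    · simp [h]

-- ===== VERDICT =====
theorem line_of_sight_trees_spec : Claim_equal_line_of_sight_trees := by
  intro trees current_height _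
  unfold Spec_line_of_sight_trees line_of_sight_trees line_of_sight_trees_alt
  rw [foldl_rev_eq_losRec, List.reverse_reverse]
  simpa using lineOfSightA_eq_losRec current_height trees []
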